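-- pv_equiv track=rewrite | github.com/max-har/10000 | ten_thousand.py | is_special
-- ===== SOURCE A (Python) =====
-- def is_special(this_throw):
--     """Check if set of dice is special (street, three pairs, two triples)."""
--     street = list(range(1, 7))
--     three_pairs = sum([1 for each_dice in this_throw if
--                        this_throw.count(each_dice) == 2]) == 6
--     two_triples = sum([1 for each_dice in this_throw if
--                        this_throw.count(each_dice) == 3]) == 6
--
--     if this_throw == street or three_pairs or two_triples:
--         return True
--     return False
-- ===== SOURCE B (Python) =====
-- def is_special(this_throw):
--     """Check if set of dice is special (street, three pairs, two triples)."""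
--     if this_throw == list(range(1, 7)):
--         return True
--     pairs = 0
--     triples = 0
--     s = sorted(this_throw)
--     while s:
--         run = 1
--         while run < len(s) and s[run] == s[0]:
--             run += 1
--         if run == 2:
--             pairs += 2
--         elif run == 3:
--             triples += 3
--         s = s[run:]
--     return pairs == 6 or triples == 6
-- ===== Notes on version B (the rewrite author's own statement) =====
-- stated objective: faster
-- what changed: B sorts the throw once and scans consecutive runs of equal values (run-length scan), accumulating the dice in runs of length exactly 2 and exactly 3, instead of A's per-element this_throw.count scans; the street check stays an exact ordered comparison.
import Mathlib
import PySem

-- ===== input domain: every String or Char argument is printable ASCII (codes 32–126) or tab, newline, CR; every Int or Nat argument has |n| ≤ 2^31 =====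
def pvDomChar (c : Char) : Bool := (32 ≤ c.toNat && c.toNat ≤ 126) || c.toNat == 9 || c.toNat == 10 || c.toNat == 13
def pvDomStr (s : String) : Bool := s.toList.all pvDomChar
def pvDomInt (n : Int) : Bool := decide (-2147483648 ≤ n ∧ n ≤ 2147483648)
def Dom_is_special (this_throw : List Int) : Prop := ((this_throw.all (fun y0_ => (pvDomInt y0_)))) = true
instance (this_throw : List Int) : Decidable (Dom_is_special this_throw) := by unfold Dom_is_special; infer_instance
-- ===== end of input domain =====

-- B sorts the throw once and scans runs of equal values, instead of A's per-element count scans (alternative algorithm: sort + run-length scan).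

-- ===== PORT A =====
def is_special (this_throw : List Int) : Bool :=
  let street := PySem.List.pyRange 1 7 1
  let three_pairs :=
    (this_throw.foldl (fun s each_dice => if this_throw.count each_dice == 2 then s + 1 else s) (0 : Int)) == 6
  let two_triples :=
    (this_throw.foldl (fun s each_dice => if this_throw.count each_dice == 3 then s + 1 else s) (0 : Int)) == 6
  if this_throw == street || three_pairs || two_triples then true else false

-- ===== PORT B =====
-- the outer `while s:` loop of Source B; the inner `while` advancing `run` over equal
-- leading values is the takeWhile of the elements after the head that equal the head
def runLoop (s : List Int) (pairs triples : Int) : Int × Int :=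
  match s with
  | [] => (pairs, triples)
  | x :: rest =>
    let k := (rest.takeWhile (fun y => y == x)).length
    let run : Int := (k : Int) + 1
    let s' := rest.drop k      -- s[run:]
    if run == 2 then runLoop s' (pairs + 2) triples
    else if run == 3 then runLoop s' pairs (triples + 3)
    else runLoop s' pairs triples
termination_by s.length
decreasing_by all_goals
  simp only [List.length_cons]
  exact Nat.lt_succ_of_le (by simpa using List.length_drop_le (l := rest) (i := (List.takeWhile (fun y => y == x) rest).length))

def is_special_alt (this_throw : List Int) : Bool :=
  if this_throw == PySem.List.pyRange 1 7 1 then true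
  else
    let s := PySem.List.sorted this_throw (fun x => x) false
    let pt := runLoop s 0 0
    pt.1 == 6 || pt.2 == 6

-- ===== PRECONDITION & SPEC =====
def Spec_is_special (this_throw : List Int) (out : Bool) : Prop := out = is_special_alt this_throw
instance (this_throw : List Int) (out : Bool) : Decidable (Spec_is_special this_throw out) := by unfold Spec_is_special; infer_instance

-- ===== CLAIM (what is proved, stated in full; the proofs are below) =====
def Claim_equal_is_special : Prop := ∀ (this_throw : List Int), Dom_is_special this_throw → Spec_is_special this_throw (is_special this_throw)

-- ===== LEMMAS AND PROOFS =====

-- number of distinct values occurring exactly n times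
def Kn (s : List Int) (n : ℕ) : ℕ := (s.toFinset.filter (fun v => s.count v = n)).card

lemma foldl_count_one (p : Int → Bool) (ys : List Int) (s : Int) :
    ys.foldl (fun s d => if p d then s + 1 else s) s = s + (ys.countP p : Int) := by
  induction ys generalizing s with
  | nil => simp
  | cons y ys ih =>
    by_cases h : p y <;> simp [List.countP_cons, h, ih] <;> ring

lemma sorted_head_run (x : Int) (rest : List Int)
    (h : List.Pairwise (· ≤ ·) (x :: rest)) :
    (rest.takeWhile (fun y => y == x)).length = rest.count x ∧
    rest.drop (rest.takeWhile (fun y => y == x)).length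
      = rest.filter (fun y => !(y == x)) := by
  induction rest with
  | nil => simp
  | cons y rest ih =>
    rcases List.pairwise_cons.mp h with ⟨hx, hrest⟩
    by_cases hyx : y = x
    · subst hyx
      have h' : List.Pairwise (· ≤ ·) (y :: rest) := by
        refine List.pairwise_cons.mpr ⟨?_, (List.pairwise_cons.mp hrest).2⟩
        exact fun z hz => (List.pairwise_cons.mp hrest).1 z hz
      have := ih h'
      simp only [List.takeWhile_cons, beq_self_eq_true, if_true, List.length_cons,
        List.count_cons_self, List.drop_succ_cons, List.filter_cons, beq_self_eq_true,
        Bool.not_true, if_neg] at *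
      exact ⟨by omega, this.2⟩
    · have hxy : x ≤ y := hx y (List.mem_cons_self)
      have hnot : x ∉ y :: rest := by
        intro hmem
        rcases List.mem_cons.mp hmem with h1 | h2
        · exact hyx h1.symm
        · have hyz : y ≤ x := (List.pairwise_cons.mp hrest).1 x h2
          exact hyx (le_antisymm hyz hxy)
      have hcount : (y :: rest).count x = 0 := List.count_eq_zero.mpr hnot
      have hfilter : (y :: rest).filter (fun z => !(z == x)) = y :: rest := by
        apply List.filter_eq_self.mpr
        intro z hz
        simp only [Bool.not_eq_eq_eq_not, Bool.not_true, beq_eq_false_iff_ne]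
        intro hzx; exact hnot (hzx ▸ hz)
      constructor
      · simp [List.takeWhile_cons, hyx, hcount]
      · simp [List.takeWhile_cons, hyx, hfilter]

lemma count_filter' (p : Int → Bool) (a : Int) (l : List Int) :
    (l.filter p).count a = if p a then l.count a else 0 := by
  induction l with
  | nil => simp
  | cons x l ih =>
    by_cases hx : p x <;> by_cases hax : x = a
    · subst hax; simp [List.filter_cons, hx, List.count_cons, ih]
    · simp [List.filter_cons, hx, List.count_cons, hax, ih]
    · subst hax; simp [List.filter_cons, hx, List.count_cons, ih]
    · simp [List.filter_cons, hx, List.count_cons, hax, ih]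

lemma Kn_cons_sorted (x : Int) (rest : List Int)
    (h : List.Pairwise (· ≤ ·) (x :: rest)) (n : ℕ) :
    Kn (x :: rest) n
      = Kn (rest.filter (fun y => !(y == x))) n
        + (if (x :: rest).count x = n then 1 else 0) := by
  classical
  set s' := rest.filter (fun y => !(y == x)) with hs'
  have hxnot : x ∉ s' := by
    intro hmem
    have := (List.mem_filter.mp hmem).2
    simp at this
  have hcnt : ∀ v : Int, v ≠ x → s'.count v = (x :: rest).count v := by
    intro v hv
    rw [hs', count_filter']
    simp [List.count_cons, hv, Ne.symm hv]
  have hfin : (x :: rest).toFinset = insert x s'.toFinset := by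
    ext v
    by_cases hv : v = x
    · subst hv; simp
    · simp only [List.mem_toFinset, List.mem_cons, Finset.mem_insert, hs', List.mem_filter]
      constructor
      · rintro (h1 | h2)
        · exact absurd h1 hv
        · exact Or.inr ⟨h2, by simp only [Bool.not_eq_eq_eq_not, Bool.not_true, beq_eq_false_iff_ne]; exact hv⟩
      · rintro (h1 | h2)
        · exact absurd h1 hv
        · exact Or.inr h2.1
  unfold Kn
  rw [hfin, Finset.filter_insert]
  have hcongr : s'.toFinset.filter (fun v => (x :: rest).count v = n)
      = s'.toFinset.filter (fun v => s'.count v = n) := by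
    apply Finset.filter_congr
    intro v hv
    have hvx : v ≠ x := by
      intro hh; exact hxnot (hh ▸ (List.mem_toFinset.mp hv))
    simp [hcnt v hvx]
  by_cases hc : (x :: rest).count x = n
  · rw [if_pos hc, if_pos hc]
    rw [Finset.card_insert_of_notMem (by
      intro hmem
      exact hxnot (List.mem_toFinset.mp (Finset.mem_filter.mp hmem).1))]
    rw [hcongr]
  · rw [if_neg hc, if_neg hc, hcongr]; omega

lemma runLoop_sorted (N : ℕ) : ∀ (s : List Int), s.length ≤ N →
    List.Pairwise (· ≤ ·) s → ∀ (p t : Int),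
    runLoop s p t = (p + 2 * (Kn s 2 : Int), t + 3 * (Kn s 3 : Int)) := by
  induction N with
  | zero =>
    intro s hs _ p t
    have : s = [] := List.eq_nil_of_length_eq_zero (Nat.le_zero.mp hs)
    subst this
    simp [runLoop, Kn]
  | succ N ih =>
    intro s hs hsort p t
    match s with
    | [] => simp [runLoop, Kn]
    | x :: rest =>
      obtain ⟨htake, hdrop⟩ := sorted_head_run x rest hsort
      set s' := rest.filter (fun y => !(y == x)) with hs'
      have hlen : s'.length ≤ N := by
        have h1 : s'.length ≤ rest.length := List.length_filter_le _ _
        simp only [List.length_cons] at hs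
        omega
      have hsort' : List.Pairwise (· ≤ ·) s' :=
        (List.pairwise_cons.mp hsort).2.sublist List.filter_sublist
      have hrec := ih s' hlen hsort'
      have hcx : (x :: rest).count x = rest.count x + 1 := by
        simp [List.count_cons]
      have hK2 := Kn_cons_sorted x rest hsort 2
      have hK3 := Kn_cons_sorted x rest hsort 3
      have hdrop2 : List.drop (rest.count x) rest = s' := by rw [← htake]; exact hdrop
      rw [runLoop]
      simp only [htake, hdrop2]
      by_cases h2 : rest.count x = 1
      · have : ((rest.count x : Int) + 1 == 2) = true := by simp [h2]
        rw [if_pos this, hrec]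
        have hn3 : (x :: rest).count x ≠ 3 := by omega
        rw [hK2, hK3, if_pos (by omega : (x :: rest).count x = 2), if_neg hn3]
        simp only [Prod.mk.injEq, ← hs']
        constructor <;> push_cast <;> ring
      · by_cases h3 : rest.count x = 2
        · have hne2 : ((rest.count x : Int) + 1 == 2) = false := by
            simp only [beq_eq_false_iff_ne]; intro hh
            have : (rest.count x : Int) = 1 := by omega
            exact h2 (by exact_mod_cast this)
          have : ((rest.count x : Int) + 1 == 3) = true := by simp [h3]
          rw [if_neg (by simp [hne2]), if_pos this, hrec]
          have hn2 : (x :: rest).count x ≠ 2 := by omega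
          rw [hK2, hK3, if_neg hn2, if_pos (by omega : (x :: rest).count x = 3)]
          simp only [Prod.mk.injEq, ← hs']
          constructor <;> push_cast <;> ring
        · have hne2 : ¬ (((rest.count x : Int) + 1 == 2) = true) := by
            simp only [beq_iff_eq]; intro hh
            have : (rest.count x : Int) = 1 := by omega
            exact h2 (by exact_mod_cast this)
          have hne3 : ¬ (((rest.count x : Int) + 1 == 3) = true) := by
            simp only [beq_iff_eq]; intro hh
            have : (rest.count x : Int) = 2 := by omega
            exact h3 (by exact_mod_cast this)
          rw [if_neg hne2, if_neg hne3, hrec]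
          have hn2 : (x :: rest).count x ≠ 2 := by omega
          have hn3 : (x :: rest).count x ≠ 3 := by omega
          rw [hK2, hK3, if_neg hn2, if_neg hn3]
          simp only [Prod.mk.injEq, ← hs']
          constructor <;> push_cast <;> ring

lemma countP_count_eq_mul (xs : List Int) (n : ℕ) :
    xs.countP (fun d => xs.count d == n) = n * Kn xs n := by
  classical
  set p : Int → Bool := fun d => xs.count d == n with hp
  have h1 : xs.countP p = (xs.filter p).length := List.countP_eq_length_filter
  have h2 : (xs.filter p).length = ∑ a ∈ (xs.filter p).toFinset, (xs.filter p).count a := by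
    have := Multiset.toFinset_sum_count_eq (xs.filter p : Multiset Int)
    simpa using this.symm
  have hsub : (xs.filter p).toFinset ⊆ xs.toFinset := by
    intro a ha; simp only [List.mem_toFinset, List.mem_filter] at *; exact ha.1
  have h3 : ∑ a ∈ (xs.filter p).toFinset, (xs.filter p).count a
      = ∑ a ∈ xs.toFinset, (xs.filter p).count a := by
    refine (Finset.sum_subset hsub ?_)
    intro a ha hna
    simp only [List.mem_toFinset] at ha
    simp only [List.mem_toFinset, List.mem_filter, not_and] at hna
    have hpa := hna ha
    simp only [Bool.not_eq_true] at hpa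
    rw [count_filter']; simp [hpa]
  have h4 : ∑ a ∈ xs.toFinset, (xs.filter p).count a
      = ∑ a ∈ xs.toFinset, (if p a then n else 0) := by
    refine Finset.sum_congr rfl ?_
    intro a _
    rw [count_filter']
    by_cases hpa : p a = true
    · have hc : xs.count a = n := by simpa [hp] using hpa
      simp [hpa, hc]
    · simp [hpa]
  have h5 : ∑ a ∈ xs.toFinset, (if p a then n else 0)
      = n * (xs.toFinset.filter (fun a => p a)).card := by
    rw [← Finset.sum_filter]
    simp [Finset.sum_const, Nat.mul_comm]
  have h6 : (xs.toFinset.filter (fun a => p a)) = xs.toFinset.filter (fun v => xs.count v = n) := by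
    apply Finset.filter_congr; intro v _; simp [hp]
  rw [h1, h2, h3, h4, h5, h6]; rfl

lemma Kn_sorted (xs : List Int) (n : ℕ) :
    Kn (PySem.List.sorted xs (fun x => x) false) n = Kn xs n := by
  have hperm : (PySem.List.sorted xs (fun x => x) false).Perm xs := PySem.List.sorted_perm xs _ false
  unfold Kn
  rw [List.toFinset_eq_of_perm _ _ hperm]
  congr 1
  apply Finset.filter_congr
  intro v _
  simp [hperm.count_eq]

-- ===== VERDICT (by name: the statement is the Claim_ definition above) =====
theorem is_special_spec : Claim_equal_is_special := by
  intro xs _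
  unfold Spec_is_special is_special is_special_alt
  by_cases hs : xs = PySem.List.pyRange 1 7 1
  · simp [hs]
  · set s := PySem.List.sorted xs (fun x => x) false with hsdef
    have hsort : List.Pairwise (· ≤ ·) s := by
      have := PySem.List.sorted_pairwise (xs := xs) (key := fun x => x)
      simpa using this
    have hrun := runLoop_sorted s.length s le_rfl hsort 0 0
    have h2 : xs.foldl (fun a d => if xs.count d == 2 then a + 1 else a) (0 : Int)
        = 2 * (Kn s 2 : Int) := by
      rw [foldl_count_one, countP_count_eq_mul xs 2, hsdef, Kn_sorted]
      push_cast; ring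
    have h3 : xs.foldl (fun a d => if xs.count d == 3 then a + 1 else a) (0 : Int)
        = 3 * (Kn s 3 : Int) := by
      rw [foldl_count_one, countP_count_eq_mul xs 3, hsdef, Kn_sorted]
      push_cast; ring
    have hb : ∀ a : ℤ, (a == 6) = decide (a = 6) := by
      intro a; by_cases h : a = 6 <;> simp [h]
    simp only [hrun, h2, h3]
    simp [hs, hb]
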